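-- pv_equiv track=rewrite | github.com/waltersmac/Data-Structures-and-Algorithms-Udacity-NanoDegree | P0/Task4.py | tele_mark
-- ===== SOURCE A (Python) =====
-- def tele_mark(text_data, call_data):
--
-- 	list_of_numbers = set()
--
-- 	send_texts = set()
-- 	rec_texts = set()
-- 	incoming_calls = set()
-- 	outgoing_calls = set()
--
-- 	for i in text_data:
-- 		if i[0] not in send_texts:
-- 			send_texts.add(i[0])
--
-- 		if i[1] not in rec_texts:
-- 			rec_texts.add(i[1])
--
-- 	for i in call_data:
-- 		if i[0] not in outgoing_calls:
-- 			outgoing_calls.add(i[0])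
--
-- 		if i[1] not in incoming_calls:
-- 			incoming_calls.add(i[1])
--
-- 	for i in outgoing_calls:
-- 		if i not in send_texts and i not in rec_texts and i not in incoming_calls:
-- 			list_of_numbers.add(i)
--
-- 	return '\n'.join(sorted(list_of_numbers))
-- ===== SOURCE B (Python) =====
-- def tele_mark(text_data, call_data):
-- 	# One merged pass: map each number to a bitmask of roles it plays,
-- 	# then keep the numbers whose role mask is exactly "outgoing caller".
-- 	SENT, RECEIVED, OUTGOING, INCOMING = 1, 2, 4, 8
-- 	events = [(t[0], SENT) for t in text_data] \
-- 		+ [(t[1], RECEIVED) for t in text_data] \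
-- 		+ [(c[0], OUTGOING) for c in call_data] \
-- 		+ [(c[1], INCOMING) for c in call_data]
-- 	roles = {}
-- 	for num, bit in events:
-- 		roles[num] = roles.get(num, 0) | bit
-- 	return '\n'.join(sorted(n for n, r in roles.items() if r == OUTGOING))
-- ===== Notes on version B (the rewrite author's own statement) =====
-- stated objective: simpler
-- what changed: Replaces A's four separate role sets and a three-way membership filter with one merged pass building a single dict from phone number to a bitmask of roles, then selecting the numbers whose mask is exactly 'outgoing'.
import Mathlib
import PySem

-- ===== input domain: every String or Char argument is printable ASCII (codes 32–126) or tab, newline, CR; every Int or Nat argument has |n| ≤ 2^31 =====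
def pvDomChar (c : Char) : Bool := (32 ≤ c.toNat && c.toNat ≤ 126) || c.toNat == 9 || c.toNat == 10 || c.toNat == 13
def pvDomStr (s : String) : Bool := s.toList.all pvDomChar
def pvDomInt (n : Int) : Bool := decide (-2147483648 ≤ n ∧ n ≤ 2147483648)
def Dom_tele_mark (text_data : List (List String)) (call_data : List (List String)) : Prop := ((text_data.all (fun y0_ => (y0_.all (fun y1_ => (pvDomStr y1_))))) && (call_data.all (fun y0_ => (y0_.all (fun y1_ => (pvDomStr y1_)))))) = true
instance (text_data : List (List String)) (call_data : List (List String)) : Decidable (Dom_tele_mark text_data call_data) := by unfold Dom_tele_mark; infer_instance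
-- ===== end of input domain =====

-- B replaces A's four separate role sets and three-way membership filter with one merged
-- dict from phone number to a role bitmask, selecting masks exactly 'outgoing' (objective: simpler).

-- ===== PORT A =====
-- row[0] / row[1]: Pre_ guarantees the index is in range, so the getD default is never
-- used inside Pre_ (Python raises IndexError on a short row, excluded by Pre_).
def pvFst (r : List String) : String := (PySem.List.pyGet? r 0).getD ""
def pvSnd (r : List String) : String := (PySem.List.pyGet? r 1).getD ""

def tele_mark (text_data : List (List String)) (call_data : List (List String)) : String :=
  let st := text_data.foldl
    (fun s i =>
      ((if PySem.Set.contains s.1 (pvFst i) then s.1 else PySem.Set.add s.1 (pvFst i)),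
       (if PySem.Set.contains s.2 (pvSnd i) then s.2 else PySem.Set.add s.2 (pvSnd i))))
    ((PySem.Set.empty : PySem.Set String), (PySem.Set.empty : PySem.Set String))
  let send_texts := st.1
  let rec_texts := st.2
  let ct := call_data.foldl
    (fun s i =>
      ((if PySem.Set.contains s.1 (pvFst i) then s.1 else PySem.Set.add s.1 (pvFst i)),
       (if PySem.Set.contains s.2 (pvSnd i) then s.2 else PySem.Set.add s.2 (pvSnd i))))
    ((PySem.Set.empty : PySem.Set String), (PySem.Set.empty : PySem.Set String))
  let outgoing_calls := ct.1
  let incoming_calls := ct.2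
  let list_of_numbers := outgoing_calls.foldl
    (fun acc i =>
      if !(PySem.Set.contains send_texts i) && !(PySem.Set.contains rec_texts i)
          && !(PySem.Set.contains incoming_calls i)
      then PySem.Set.add acc i else acc)
    (PySem.Set.empty : PySem.Set String)
  PySem.Str.join "\n" (PySem.List.sorted list_of_numbers (fun x => x) false)

-- ===== PORT B =====
def tele_mark_alt (text_data : List (List String)) (call_data : List (List String)) : String :=
  let events : List (String × Int) :=
    text_data.map (fun t => (pvFst t, 1)) ++ text_data.map (fun t => (pvSnd t, 2))
    ++ call_data.map (fun c => (pvFst c, 4)) ++ call_data.map (fun c => (pvSnd c, 8))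
  let roles := events.foldl
    (fun d p => d.insert p.1 (PySem.Int.bor (d.getD p.1 0) p.2))
    (PySem.Dict.empty : PySem.Dict String Int)
  PySem.Str.join "\n"
    (PySem.List.sorted ((roles.items.filter (fun p => p.2 == 4)).map Prod.fst) (fun x => x) false)

-- ===== PRECONDITION & SPEC =====
-- Pre_ excludes exactly the inputs where Python A raises IndexError: a row with fewer than two fields.
def Pre_tele_mark (text_data : List (List String)) (call_data : List (List String)) : Prop :=
  (∀ r ∈ text_data, 2 ≤ r.length) ∧ (∀ r ∈ call_data, 2 ≤ r.length)
instance (text_data : List (List String)) (call_data : List (List String)) : Decidable (Pre_tele_mark text_data call_data) := by unfold Pre_tele_mark; infer_instance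
def pvWitness_tele_mark : List (List String) × List (List String) :=
  ([["1", "2"]], [["3", "4"], ["5", "2"]])

def Spec_tele_mark (text_data : List (List String)) (call_data : List (List String)) (out : String) : Prop := out = tele_mark_alt text_data call_data
instance (text_data : List (List String)) (call_data : List (List String)) (out : String) : Decidable (Spec_tele_mark text_data call_data out) := by unfold Spec_tele_mark; infer_instance

-- ===== CLAIM (what is proved, stated in full; the proofs are below) =====
def Claim_equal_tele_mark : Prop := ∀ (text_data : List (List String)) (call_data : List (List String)), Dom_tele_mark text_data call_data → Pre_tele_mark text_data call_data → Spec_tele_mark text_data call_data (tele_mark text_data call_data)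

-- ===== LEMMAS AND PROOFS =====

-- 'x occurs in l under accessor k' (Bool so that it can sit in an if-condition)
def pvOcc (l : List (List String)) (k : List String → String) (x : String) : Bool :=
  l.any (fun t => k t == x)

theorem pvOcc_iff (l : List (List String)) (k : List String → String) (x : String) :
    pvOcc l k x = true ↔ ∃ t ∈ l, k t = x := by
  simp [pvOcc]

theorem pvBor_nonneg (a c : Int) (ha : 0 ≤ a) (hc : 0 ≤ c) : 0 ≤ PySem.Int.bor a c := by
  rw [PySem.Int.bor_of_nonneg ha hc]; positivity

theorem pvBor_idem (a c : Int) (ha : 0 ≤ a) (hc : 0 ≤ c) :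
    PySem.Int.bor (PySem.Int.bor a c) c = PySem.Int.bor a c := by
  rw [PySem.Int.bor_of_nonneg ha hc, PySem.Int.bor_of_nonneg (by positivity) hc]
  simp

-- A's guarded insert is Set.add
theorem pvStep_add (s : PySem.Set String) (x : String) :
    (if PySem.Set.contains s x then s else PySem.Set.add s x) = PySem.Set.add s x := by
  unfold PySem.Set.add
  by_cases h : PySem.Set.contains s x
  · rw [if_pos h, if_pos h]
  · rw [if_neg h]

-- one segment of B's fold: a constant bit c under accessor k
theorem pvSeg (l : List (List String)) (k : List String → String) (c : Int) (hc : 0 ≤ c)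
    (x : String) :
    ∀ (d : PySem.Dict String Int), 0 ≤ d.getD x 0 →
    (l.foldl (fun d t => d.insert (k t) (PySem.Int.bor (d.getD (k t) 0) c)) d).getD x 0
      = if pvOcc l k x then PySem.Int.bor (d.getD x 0) c else d.getD x 0 := by
  induction l with
  | nil => intro d hd; simp [pvOcc]
  | cons t l ih =>
    intro d hd
    simp only [List.foldl_cons]
    have hx : (d.insert (k t) (PySem.Int.bor (d.getD (k t) 0) c)).getD x 0
        = if x = k t then PySem.Int.bor (d.getD (k t) 0) c else d.getD x 0 :=
      PySem.Dict.getD_insert _ _ _ _ _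
    by_cases hkt : x = k t
    · rw [ih _ (by rw [hx, if_pos hkt, ← hkt]; exact pvBor_nonneg _ _ hd hc)]
      rw [hx, if_pos hkt, ← hkt]
      have hocc : pvOcc (t :: l) k x = true := (pvOcc_iff _ _ _).mpr ⟨t, by simp, hkt.symm⟩
      rw [if_pos hocc]
      by_cases hl : pvOcc l k x
      · rw [if_pos hl, pvBor_idem _ _ hd hc]
      · rw [if_neg hl]
    · rw [ih _ (by rw [hx, if_neg hkt]; exact hd)]
      rw [hx, if_neg hkt]
      by_cases hl : pvOcc l k x
      · obtain ⟨u, hu, hku⟩ := (pvOcc_iff _ _ _).mp hl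
        rw [if_pos hl, if_pos ((pvOcc_iff _ _ _).mpr ⟨u, List.mem_cons_of_mem _ hu, hku⟩)]
      · rw [if_neg hl, if_neg (by
          intro h
          obtain ⟨u, hu, hku⟩ := (pvOcc_iff _ _ _).mp h
          rcases List.mem_cons.mp hu with rfl | hmem
          · exact hkt hku.symm
          · exact hl ((pvOcc_iff _ _ _).mpr ⟨u, hmem, hku⟩))]

-- A-side: the pair fold builds the two ofLists
theorem pvPairFold (l : List (List String)) :
    l.foldl
      (fun s i =>
        ((if PySem.Set.contains s.1 (pvFst i) then s.1 else PySem.Set.add s.1 (pvFst i)),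
         (if PySem.Set.contains s.2 (pvSnd i) then s.2 else PySem.Set.add s.2 (pvSnd i))))
      ((PySem.Set.empty : PySem.Set String), (PySem.Set.empty : PySem.Set String))
    = (PySem.Set.ofList (l.map pvFst), PySem.Set.ofList (l.map pvSnd)) := by
  have h : (fun (s : PySem.Set String × PySem.Set String) (i : List String) =>
        ((if PySem.Set.contains s.1 (pvFst i) then s.1 else PySem.Set.add s.1 (pvFst i)),
         (if PySem.Set.contains s.2 (pvSnd i) then s.2 else PySem.Set.add s.2 (pvSnd i))))
      = fun s i => (PySem.Set.add s.1 (pvFst i), PySem.Set.add s.2 (pvSnd i)) := by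
    funext s i; rw [pvStep_add, pvStep_add]
  rw [h, PySem.List.foldl_prod_mk (f := fun s i => PySem.Set.add s (pvFst i))
        (g := fun s i => PySem.Set.add s (pvSnd i))]
  rw [← PySem.Set.update_map_eq_foldl_add, ← PySem.Set.update_map_eq_foldl_add,
      PySem.Set.update_empty, PySem.Set.update_empty]

theorem pvA_eq (text_data call_data : List (List String)) :
  tele_mark text_data call_data = PySem.Str.join "\n" (PySem.List.sorted
    (PySem.Set.ofList ((PySem.Set.ofList (call_data.map pvFst)).filter (fun i =>
      !(PySem.Set.contains (PySem.Set.ofList (text_data.map pvFst)) i)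
      && !(PySem.Set.contains (PySem.Set.ofList (text_data.map pvSnd)) i)
      && !(PySem.Set.contains (PySem.Set.ofList (call_data.map pvSnd)) i)))) (fun x => x) false) := by
  unfold tele_mark
  rw [pvPairFold, pvPairFold]
  dsimp only
  rw [PySem.List.foldl_if_eq_foldl_filter]
  rw [show (PySem.Set.empty : PySem.Set String) = [] from rfl, ← PySem.Set.ofList_eq_foldl]

def pvEvents (text_data call_data : List (List String)) : List (String × Int) :=
  text_data.map (fun t => (pvFst t, 1)) ++ text_data.map (fun t => (pvSnd t, 2))
  ++ call_data.map (fun c => (pvFst c, 4)) ++ call_data.map (fun c => (pvSnd c, 8))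

def pvRoles (text_data call_data : List (List String)) : PySem.Dict String Int :=
  (pvEvents text_data call_data).foldl
    (fun d p => d.insert p.1 (PySem.Int.bor (d.getD p.1 0) p.2)) PySem.Dict.empty

theorem pvB_eq (text_data call_data : List (List String)) :
    tele_mark_alt text_data call_data = PySem.Str.join "\n"
      (PySem.List.sorted (((pvRoles text_data call_data).items.filter
        (fun p => p.2 == 4)).map Prod.fst) (fun x => x) false) := rfl

theorem pvRoles_getD (text_data call_data : List (List String)) (x : String) :
    (pvRoles text_data call_data).getD x 0 =
      (fun v3 =>
       (fun v2 =>
        (fun v1 =>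
         (fun v0 =>
           if pvOcc call_data pvSnd x then PySem.Int.bor v0 8 else v0)
         (if pvOcc call_data pvFst x then PySem.Int.bor v1 4 else v1))
        (if pvOcc text_data pvSnd x then PySem.Int.bor v2 2 else v2))
       (if pvOcc text_data pvFst x then PySem.Int.bor v3 1 else v3)) 0 := by
  unfold pvRoles pvEvents
  rw [List.foldl_append, List.foldl_append, List.foldl_append]
  rw [List.foldl_map, List.foldl_map, List.foldl_map, List.foldl_map]
  have h0 : (PySem.Dict.empty : PySem.Dict String Int).getD x 0 = 0 := by
    simp [pysem]
  have e1 := pvSeg text_data pvFst 1 (by norm_num) x PySem.Dict.empty (by rw [h0])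
  rw [h0] at e1
  have hn1 : 0 ≤ (List.foldl (fun d t => d.insert (pvFst t) (PySem.Int.bor (d.getD (pvFst t) 0) 1)) PySem.Dict.empty text_data).getD x 0 := by
    rw [e1]; split <;> decide
  have e2 := pvSeg text_data pvSnd 2 (by norm_num) x _ hn1
  rw [e1] at e2
  have hn2 : 0 ≤ (List.foldl (fun d t => d.insert (pvSnd t) (PySem.Int.bor (d.getD (pvSnd t) 0) 2)) (List.foldl (fun d t => d.insert (pvFst t) (PySem.Int.bor (d.getD (pvFst t) 0) 1)) PySem.Dict.empty text_data) text_data).getD x 0 := by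
    rw [e2]; repeat' split
    all_goals decide
  have e3 := pvSeg call_data pvFst 4 (by norm_num) x _ hn2
  rw [e2] at e3
  have hn3 : 0 ≤ (List.foldl (fun d t => d.insert (pvFst t) (PySem.Int.bor (d.getD (pvFst t) 0) 4)) (List.foldl (fun d t => d.insert (pvSnd t) (PySem.Int.bor (d.getD (pvSnd t) 0) 2)) (List.foldl (fun d t => d.insert (pvFst t) (PySem.Int.bor (d.getD (pvFst t) 0) 1)) PySem.Dict.empty text_data) text_data) call_data).getD x 0 := by
    rw [e3]; repeat' split
    all_goals decide
  have e4 := pvSeg call_data pvSnd 8 (by norm_num) x _ hn3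
  rw [e3] at e4
  rw [e4]

theorem pvGetD4 (text_data call_data : List (List String)) (x : String) :
    ((pvRoles text_data call_data).getD x 0 = 4) ↔
      (pvOcc call_data pvFst x = true ∧ ¬ pvOcc text_data pvFst x = true
        ∧ ¬ pvOcc text_data pvSnd x = true ∧ ¬ pvOcc call_data pvSnd x = true) := by
  rw [pvRoles_getD]
  by_cases hS : pvOcc text_data pvFst x <;>
    by_cases hR : pvOcc text_data pvSnd x <;>
      by_cases hO : pvOcc call_data pvFst x <;>
        by_cases hI : pvOcc call_data pvSnd x <;>
          simp [hS, hR, hO, hI] <;> decide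

theorem pvKeys (text_data call_data : List (List String)) :
    (pvRoles text_data call_data).keys
      = PySem.Set.ofList ((pvEvents text_data call_data).map Prod.fst) := by
  unfold pvRoles
  rw [PySem.Dict.keys_foldl_insert_key (key := Prod.fst)
        (f := fun d p => PySem.Int.bor (d.getD p.1 0) p.2)]
  rw [PySem.Dict.keys_empty, PySem.Set.update_nil_left]

theorem pvKeys_nodup (text_data call_data : List (List String)) :
    (pvRoles text_data call_data).keys.Nodup := by
  unfold pvRoles
  exact PySem.Dict.nodup_keys_foldl_insert_key _ _ _ _ PySem.Dict.nodup_keys_empty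

theorem pvMemKeys (text_data call_data : List (List String)) (x : String) :
    x ∈ (pvRoles text_data call_data).keys ↔
      (pvOcc text_data pvFst x = true ∨ pvOcc text_data pvSnd x = true
        ∨ pvOcc call_data pvFst x = true ∨ pvOcc call_data pvSnd x = true) := by
  rw [pvKeys, PySem.Set.mem_ofList]
  unfold pvEvents
  rw [pvOcc_iff, pvOcc_iff, pvOcc_iff, pvOcc_iff]
  simp only [List.map_append, List.map_map, List.mem_append, List.mem_map, Function.comp]
  aesop

theorem pvLB (text_data call_data : List (List String)) :
    (((pvRoles text_data call_data).items.filter (fun p => p.2 == 4)).map Prod.fst)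
      = (pvRoles text_data call_data).keys.filter
          (fun k => (pvRoles text_data call_data).getD k 0 == 4) := by
  rw [PySem.Dict.items_eq_map_keys _ (pvKeys_nodup text_data call_data) 0]
  rw [List.filter_map, List.map_map]
  simp [Function.comp_def]

theorem pvOcc_iff_mem_map (l : List (List String)) (k : List String → String) (a : String) :
    pvOcc l k a = true ↔ a ∈ l.map k := by
  rw [pvOcc_iff]
  exact (List.mem_map).symm

theorem pvContains_false (l : List (List String)) (k : List String → String) (a : String) :
    ((PySem.Set.ofList (l.map k)).contains a = false) ↔ ¬ pvOcc l k a = true := by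
  rw [pvOcc_iff_mem_map]
  have h := (PySem.Set.contains_iff (PySem.Set.ofList (l.map k)) a).trans (PySem.Set.mem_ofList _ _)
  rw [← h]
  simp

theorem pvMain (text_data call_data : List (List String)) :
    tele_mark text_data call_data = tele_mark_alt text_data call_data := by
  rw [pvA_eq, pvB_eq, pvLB]
  apply congrArg
  apply PySem.List.sorted_eq_sorted_of_perm _ _ _ (fun a b h => h)
  apply (List.perm_ext_iff_of_nodup (PySem.Set.nodup_ofList _)
          (List.Nodup.filter _ (pvKeys_nodup text_data call_data))).mpr
  intro a
  rw [PySem.Set.mem_ofList, List.mem_filter, List.mem_filter, PySem.Set.mem_ofList]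
  rw [pvMemKeys]
  simp only [Bool.and_eq_true, Bool.not_eq_true', beq_iff_eq]
  rw [pvGetD4, pvContains_false, pvContains_false, pvContains_false, ← pvOcc_iff_mem_map]
  tauto

-- ===== VERDICT (by name: the statement is the Claim_ definition above) =====
theorem tele_mark_spec : Claim_equal_tele_mark := by
  intro text_data call_data _ _
  unfold Spec_tele_mark
  exact pvMain text_data call_data
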